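-- pv_equiv track=rewrite | github.com/Bautyruiz/repositorioprogramacion | ejercicios utn/ejs.listas.py | encontrar_menores_edad
-- ===== SOURCE A (Python) =====
-- def encontrar_menores_edad(nombres, edades):
--     menores = []
--     menor_edad = edades[0]  # Inicializamos con el primer valor de la lista
--
--     # Encontrar la menor edad
--     for edad in edades:
--         if edad < menor_edad:
--             menor_edad = edad
--
--     # Encontrar los nombres de las personas con la menor edad
--     for i in range(len(edades)):
--         if edades[i] == menor_edad:
--             menores = menores + [(nombres[i], edades[i])]
--
--     return menores
-- ===== SOURCE B (Python) =====
-- def encontrar_menores_edad(nombres, edades):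
--     menor_edad = edades[0]
--     idxs = []
--     for i in range(len(edades)):
--         e = edades[i]
--         if e < menor_edad:
--             menor_edad = e
--             idxs = [i]
--         elif e == menor_edad:
--             idxs.append(i)
--     return [(nombres[i], edades[i]) for i in idxs]
-- ===== Notes on version B (the rewrite author's own statement) =====
-- stated objective: faster
-- what changed: Replaces A's two passes (find the minimum, then filter matching indices while rebuilding the result with 'menores = menores + [...]', which copies the list on every match) by a single scan maintaining the running minimum and the indices attaining it, building the (name, age) pairs once at the end.
import Mathlib
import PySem

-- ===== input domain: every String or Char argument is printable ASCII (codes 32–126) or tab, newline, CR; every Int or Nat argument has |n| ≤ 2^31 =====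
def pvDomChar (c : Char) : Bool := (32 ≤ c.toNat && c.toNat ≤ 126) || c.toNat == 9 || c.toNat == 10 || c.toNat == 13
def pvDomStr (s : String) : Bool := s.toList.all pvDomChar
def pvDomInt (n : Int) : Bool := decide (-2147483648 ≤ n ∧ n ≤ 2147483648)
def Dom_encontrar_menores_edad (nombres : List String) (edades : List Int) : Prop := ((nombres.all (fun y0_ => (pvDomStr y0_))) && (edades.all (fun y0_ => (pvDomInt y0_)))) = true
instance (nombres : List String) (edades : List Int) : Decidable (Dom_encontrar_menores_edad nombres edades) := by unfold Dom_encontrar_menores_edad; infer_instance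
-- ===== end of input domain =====

-- B replaces A's two passes (find min, then filter) by ONE scan that maintains the
-- running minimum together with the indices attaining it (objective: alternative).

-- ===== PORT A =====
-- menor_edad after the first loop: fold of the running-minimum update over edades,
-- started from edades[0].
def pvMinA (edades : List Int) : Int :=
  edades.foldl (fun m e => if e < m then e else m) ((PySem.List.pyGet? edades 0).getD 0)

def encontrar_menores_edad (nombres : List String) (edades : List Int) : List (String × Int) :=
  let menor := pvMinA edades
  (PySem.List.pyRange 0 edades.length 1).foldl
    (fun acc i =>
      if (PySem.List.pyGet? edades i).getD 0 = menor then
        acc ++ [((PySem.List.pyGet? nombres i).getD "", (PySem.List.pyGet? edades i).getD 0)]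
      else acc) []

-- ===== PORT B =====
-- one step of B's single scan: state = (running minimum, indices attaining it)
def pvBStep (edades : List Int) (st : Int × List Int) (i : Int) : Int × List Int :=
  let e := (PySem.List.pyGet? edades i).getD 0
  if e < st.1 then (e, [i])
  else if e = st.1 then (st.1, st.2 ++ [i])
  else st

def encontrar_menores_edad_alt (nombres : List String) (edades : List Int) : List (String × Int) :=
  let st := (PySem.List.pyRange 0 edades.length 1).foldl (pvBStep edades)
      (((PySem.List.pyGet? edades 0).getD 0), ([] : List Int))
  st.2.map (fun i =>
    ((PySem.List.pyGet? nombres i).getD "", (PySem.List.pyGet? edades i).getD 0))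

-- ===== PRECONDITION & SPEC =====
-- Pre_ excludes exactly the inputs on which A raises IndexError: empty edades
-- (edades[0]), and any input where some index attaining the minimum age lies
-- beyond the end of nombres (nombres[i]).
def Pre_encontrar_menores_edad (nombres : List String) (edades : List Int) : Prop :=
  edades ≠ [] ∧
  ∀ i : Nat, i < edades.length →
    (∀ j : Nat, j < edades.length → edades[i]! ≤ edades[j]!) → i < nombres.length

instance (nombres : List String) (edades : List Int) : Decidable (Pre_encontrar_menores_edad nombres edades) := by unfold Pre_encontrar_menores_edad; infer_instance

def pvWitness_encontrar_menores_edad : List String × List Int := (["ana", "bo"], [7, 5])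

def Spec_encontrar_menores_edad (nombres : List String) (edades : List Int) (out : List (String × Int)) : Prop := out = encontrar_menores_edad_alt nombres edades
instance (nombres : List String) (edades : List Int) (out : List (String × Int)) : Decidable (Spec_encontrar_menores_edad nombres edades out) := by unfold Spec_encontrar_menores_edad; infer_instance

-- ===== CLAIM (what is proved, stated in full; the proofs are below) =====
def Claim_equal_encontrar_menores_edad : Prop := ∀ (nombres : List String) (edades : List Int), Dom_encontrar_menores_edad nombres edades → Pre_encontrar_menores_edad nombres edades → Spec_encontrar_menores_edad nombres edades (encontrar_menores_edad nombres edades)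

-- ===== LEMMAS AND PROOFS =====

-- the value B reads at index i
def pvV (edades : List Int) (i : Int) : Int := (PySem.List.pyGet? edades i).getD 0

-- the running minimum over the first k elements, started from edades[0]
def pvMinPre (edades : List Int) (k : Nat) : Int :=
  (edades.take k).foldl (fun m e => if e < m then e else m) ((PySem.List.pyGet? edades 0).getD 0)

lemma pvV_natCast (edades : List Int) (k : Nat) (hk : k < edades.length) :
    pvV edades (k : Int) = edades[k]! := by
  simp [pvV, PySem.List.pyGet?_natCast, List.getElem?_eq_getElem hk,
    getElem!_pos edades k hk]

lemma pvBStep_eq (edades : List Int) (k : Nat) (hk : k < edades.length) (st : Int × List Int) :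
    pvBStep edades st ((k : Nat) : Int) =
      if edades[k]! < st.1 then (edades[k]!, [((k : Nat) : Int)])
      else if edades[k]! = st.1 then (st.1, st.2 ++ [((k : Nat) : Int)]) else st := by
  have h := pvV_natCast edades k hk
  simp only [pvV] at h
  simp only [pvBStep]
  rw [h]

lemma pvMinPre_succ (edades : List Int) (k : Nat) (hk : k < edades.length) :
    pvMinPre edades (k + 1) =
      if edades[k]! < pvMinPre edades k then edades[k]! else pvMinPre edades k := by
  unfold pvMinPre
  rw [List.take_add_one, List.getElem?_eq_getElem hk, List.foldl_append]
  simp [getElem!_pos edades k hk]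

lemma pvMinA_eq (edades : List Int) : pvMinA edades = pvMinPre edades edades.length := by
  simp [pvMinA, pvMinPre]

-- the single-scan invariant: after the first k indices, B's state is
-- (min of the prefix, indices of the prefix attaining that min), and the
-- running minimum is a lower bound of the prefix.
lemma pvB_inv (edades : List Int) (k : Nat) (hk : k ≤ edades.length) :
    ((PySem.List.pyRange 0 k 1).foldl (pvBStep edades)
        (((PySem.List.pyGet? edades 0).getD 0), ([] : List Int))).1 = pvMinPre edades k ∧
    (∀ i : Nat, i < k → pvMinPre edades k ≤ edades[i]!) ∧
    ((PySem.List.pyRange 0 k 1).foldl (pvBStep edades)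
        (((PySem.List.pyGet? edades 0).getD 0), ([] : List Int))).2 =
      (PySem.List.pyRange 0 k 1).filter (fun i => pvV edades i = pvMinPre edades k) := by
  induction k with
  | zero => simp [PySem.List.pyRange_one_eq_nil, pvMinPre]
  | succ k ih =>
    obtain ⟨ih1, ih2, ih3⟩ := ih (Nat.le_of_succ_le hk)
    have hklt : k < edades.length := hk
    have hsplit : PySem.List.pyRange 0 ((k + 1 : Nat) : Int) 1
        = PySem.List.pyRange 0 (k : Nat) 1 ++ [((k : Nat) : Int)] := by
      push_cast
      exact PySem.List.pyRange_one_succ_right (Int.natCast_nonneg k)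
    have hv : pvV edades (k : Int) = edades[k]! := pvV_natCast edades k hklt
    have hmono : ∀ i : Nat, i < k + 1 → pvMinPre edades (k+1) ≤ edades[i]! := by
      intro i hi
      rw [pvMinPre_succ edades k hklt]
      rcases Nat.lt_succ_iff_lt_or_eq.mp hi with hi | hi
      · have := ih2 i hi
        split <;> omega
      · subst hi; split <;> omega
    refine ⟨?_, hmono, ?_⟩
    · rw [hsplit, List.foldl_append]
      simp only [List.foldl_cons, List.foldl_nil]
      rw [pvBStep_eq edades k hklt, ih1, pvMinPre_succ edades k hklt]
      split_ifs with h1 h2 <;> simp [ih1]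
    · rw [hsplit, List.foldl_append, List.filter_append]
      simp only [List.foldl_cons, List.foldl_nil]
      rw [pvBStep_eq edades k hklt, ih1, ih3, pvMinPre_succ edades k hklt]
      by_cases h1 : edades[k]! < pvMinPre edades k
      · -- new strict minimum: earlier indices no longer attain it
        have hnone : (PySem.List.pyRange 0 (k : Nat) 1).filter
            (fun i => decide (pvV edades i = edades[k]!)) = [] := by
          rw [List.filter_eq_nil_iff]
          intro i hi
          rw [PySem.List.mem_pyRange_one] at hi
          obtain ⟨hi0, hik⟩ := hi
          have hvi : pvV edades i = edades[i.toNat]! := by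
            have h' : ((i.toNat : Nat) : Int) = i := by omega
            have hp := pvV_natCast edades i.toNat (by omega)
            rwa [h'] at hp
          have hge := ih2 i.toNat (by omega)
          simp only [hvi, decide_eq_true_eq]
          omega
        simp only [if_pos h1]
        rw [hnone]
        simp [hv]
      · simp only [if_neg h1]
        by_cases h2 : edades[k]! = pvMinPre edades k
        · simp only [if_pos h2]
          rw [List.filter_singleton, decide_eq_true (hv.trans h2)]
          simp
        · simp only [if_neg h2]
          rw [List.filter_singleton, decide_eq_false (fun h => h2 (hv.symm.trans h))]
          simpa using ih3

-- A's second loop is filter-then-map over the index range.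
lemma pvA_loop (nombres : List String) (edades : List Int) (m : Int) :
    (PySem.List.pyRange 0 edades.length 1).foldl
      (fun acc i =>
        if (PySem.List.pyGet? edades i).getD 0 = m then
          acc ++ [((PySem.List.pyGet? nombres i).getD "", (PySem.List.pyGet? edades i).getD 0)]
        else acc) []
    = ((PySem.List.pyRange 0 edades.length 1).filter
        (fun i => pvV edades i = m)).map
        (fun i => ((PySem.List.pyGet? nombres i).getD "", (PySem.List.pyGet? edades i).getD 0)) := by
  rw [PySem.List.foldl_append_ite (fun i => (PySem.List.pyGet? edades i).getD 0 = m)]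
  simp only [pvV, List.nil_append]
  rfl

-- ===== VERDICT (by name: the statement is the Claim_ definition above) =====
theorem encontrar_menores_edad_spec : Claim_equal_encontrar_menores_edad := by
  intro nombres edades _ _
  unfold Spec_encontrar_menores_edad
  obtain ⟨h1, h2, h3⟩ := pvB_inv edades edades.length le_rfl
  simp only [encontrar_menores_edad, encontrar_menores_edad_alt, pvA_loop, h3, pvMinA_eq]
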